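-- pv_equiv track=rewrite | github.com/posl/comment_recommendation | script/mod_gen/2_time/zh/151_D/7.py | solve
-- ===== SOURCE A (Python) =====
-- def solve(n, m, p, s):
--     ac = 0
--     wa = 0
--     acs = [0] * n
--     was = [0] * n
--     for i in range(m):
--         if s[i] == "AC":
--             if acs[p[i]-1] == 0:
--                 ac += 1
--                 acs[p[i]-1] = 1
--                 wa += was[p[i]-1]
--         else:
--             if acs[p[i]-1] == 0:
--                 was[p[i]-1] += 1
--     return ac, wa
-- ===== SOURCE B (Python) =====
-- def solve(n, m, p, s):
--     events = [[] for _ in range(n)]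
--     for i in range(m):
--         events[p[i] - 1].append(s[i])
--     ac = 0
--     wa = 0
--     for ev in events:
--         if "AC" in ev:
--             ac += 1
--             wa += ev.index("AC")
--     return ac, wa
-- ===== Notes on version B (the rewrite author's own statement) =====
-- stated objective: alternative
-- what changed: B first groups the submission statuses into per-problem buckets and then, in a second pass, counts each bucket's first 'AC' (whose index is exactly the penalty), replacing A's single interleaved pass over parallel flag/counter arrays.
import Mathlib
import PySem

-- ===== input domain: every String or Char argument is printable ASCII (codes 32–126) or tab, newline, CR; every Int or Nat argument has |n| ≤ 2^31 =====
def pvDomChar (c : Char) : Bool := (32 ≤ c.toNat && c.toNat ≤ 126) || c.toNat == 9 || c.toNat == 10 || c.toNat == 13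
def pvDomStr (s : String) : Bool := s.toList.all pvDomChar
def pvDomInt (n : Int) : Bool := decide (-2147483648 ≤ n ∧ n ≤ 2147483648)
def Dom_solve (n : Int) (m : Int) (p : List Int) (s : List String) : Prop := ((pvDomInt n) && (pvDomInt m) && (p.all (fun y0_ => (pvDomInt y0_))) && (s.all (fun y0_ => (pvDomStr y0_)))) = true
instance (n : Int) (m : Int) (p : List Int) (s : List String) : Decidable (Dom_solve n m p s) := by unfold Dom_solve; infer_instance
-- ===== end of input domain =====

-- B replaces A's single interleaved pass over parallel flag/counter arrays by a bucket-then-scan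
-- decomposition (group statuses per problem, then read each bucket's first "AC" off with index);
-- same asymptotic cost, a different algorithmic decomposition.

-- ===== PORT A =====
-- one iteration of A's for-loop; state = (ac, wa, acs, was)
def solveBodyA (p : List Int) (s : List String) (st : Int × Int × List Int × List Int) (i : Int) :
    Int × Int × List Int × List Int :=
  let ac := st.1; let wa := st.2.1; let acs := st.2.2.1; let was := st.2.2.2
  let j := PySem.List.pyGetD p i 0 - 1
  if PySem.List.pyGetD s i "" = "AC" then
    if PySem.List.pyGetD acs j 0 = 0 then
      (ac + 1, wa + PySem.List.pyGetD was j 0, PySem.List.pySetD acs j 1, was)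
    else st
  else
    if PySem.List.pyGetD acs j 0 = 0 then
      (ac, wa, acs, PySem.List.pySetD was j (PySem.List.pyGetD was j 0 + 1))
    else st

def solve (n : Int) (m : Int) (p : List Int) (s : List String) : Int × Int :=
  let st := (PySem.List.pyRange 0 m 1).foldl (solveBodyA p s)
      (0, 0, List.replicate n.toNat 0, List.replicate n.toNat 0)
  (st.1, st.2.1)

-- ===== PORT B =====
-- one iteration of B's first loop: append s[i] to bucket p[i]-1
def solveBodyB (p : List Int) (s : List String) (ev : List (List String)) (i : Int) :
    List (List String) :=
  let j := PySem.List.pyGetD p i 0 - 1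
  PySem.List.pySetD ev j (PySem.List.pyGetD ev j [] ++ [PySem.List.pyGetD s i ""])

-- one iteration of B's second loop: if "AC" in ev: ac += 1; wa += ev.index("AC")
def solveScanB (acwa : Int × Int) (ev : List String) : Int × Int :=
  match PySem.List.index? ev "AC" with
  | some k => (acwa.1 + 1, acwa.2 + (k : Int))
  | none => acwa

def solve_alt (n : Int) (m : Int) (p : List Int) (s : List String) : Int × Int :=
  let events := (PySem.List.pyRange 0 m 1).foldl (solveBodyB p s) (List.replicate n.toNat [])
  events.foldl solveScanB (0, 0)

-- ===== PRECONDITION & SPEC =====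
-- Exactly where A returns: each of the m processed submissions must have an in-range
-- status index (m ≤ len s, m ≤ len p) and a problem index p[i]-1 valid for the n buckets
-- (Python's negative-index wraparound included); for m < 0 the loop runs zero times.
def Pre_solve (n : Int) (m : Int) (p : List Int) (s : List String) : Prop :=
  m ≤ (p.length : Int) ∧ m ≤ (s.length : Int) ∧
    ∀ x ∈ p.take m.toNat, PySem.Raise.InRange n.toNat (x - 1)
instance (n : Int) (m : Int) (p : List Int) (s : List String) : Decidable (Pre_solve n m p s) := by
  unfold Pre_solve; infer_instance

def pvWitness_solve : Int × Int × List Int × List String := (2, 3, [1, 2, 1], ["WA", "AC", "AC"])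

def Spec_solve (n : Int) (m : Int) (p : List Int) (s : List String) (out : Int × Int) : Prop := out = solve_alt n m p s
instance (n : Int) (m : Int) (p : List Int) (s : List String) (out : Int × Int) : Decidable (Spec_solve n m p s out) := by unfold Spec_solve; infer_instance

-- ===== CLAIM (what is proved, stated in full; the proofs are below) =====
def Claim_equal_solve : Prop := ∀ (n : Int) (m : Int) (p : List Int) (s : List String), Dom_solve n m p s → Pre_solve n m p s → Spec_solve n m p s (solve n m p s)

-- ===== LEMMAS AND PROOFS =====

-- bucket summaries: mAC = A's acs entry, mWA = A's was entry, fWA = wa contribution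
def mAC (ev : List String) : Int := if "AC" ∈ ev then 1 else 0

def mWA (ev : List String) : Int :=
  match PySem.List.index? ev "AC" with
  | some k => (k : Int)
  | none => (ev.length : Int)

def fWA (ev : List String) : Int :=
  match PySem.List.index? ev "AC" with
  | some k => (k : Int)
  | none => 0

lemma pyIdx?_of_inRange {N : Nat} {j : Int} (h : PySem.Raise.InRange N j) :
    ∃ jn, PySem.List.pyIdx? N j = some jn ∧ jn < N := by
  obtain ⟨h1, h2⟩ := h
  unfold PySem.List.pyIdx?
  by_cases h0 : 0 ≤ j
  · exact ⟨j.toNat, by simp [h0, h2], by omega⟩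
  · refine ⟨N - (-j).toNat, by simp [h0, h1], by omega⟩

lemma pyGetD_idx {α : Type} (xs : List α) (j : Int) (d : α) (jn : Nat)
    (h : PySem.List.pyIdx? xs.length j = some jn) :
    PySem.List.pyGetD xs j d = xs.getD jn d := by
  simp [PySem.List.pyGetD, PySem.List.pyGet?, h, List.getD]

lemma pySetD_idx {α : Type} (xs : List α) (j : Int) (v : α) (jn : Nat)
    (h : PySem.List.pyIdx? xs.length j = some jn) :
    PySem.List.pySetD xs j v = xs.set jn v := by
  simp [PySem.List.pySetD, PySem.List.pySet?, h]

lemma sum_set_int (l : List Int) (n : Nat) (a : Int) (h : n < l.length) :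
    (l.set n a).sum = l.sum + a - l[n] := by
  induction l generalizing n with
  | nil => simp at h
  | cons x xs ih =>
    cases n with
    | zero => simp [List.set]; ring
    | succ k =>
      simp only [List.set, List.sum_cons, List.getElem_cons_succ]
      rw [ih k (by simpa using h)]; ring

-- scanning the buckets adds the mAC-sum and fWA-sum to the accumulator
lemma scan_eq (E : List (List String)) : ∀ acwa : Int × Int,
    E.foldl solveScanB acwa = (acwa.1 + (E.map mAC).sum, acwa.2 + (E.map fWA).sum) := by
  induction E with
  | nil => intro acwa; simp
  | cons b E ih =>
    intro acwa
    simp only [List.foldl_cons, List.map_cons, List.sum_cons, ih]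
    unfold solveScanB mAC fWA
    rcases h : PySem.List.index? b "AC" with _ | k
    · have hb := (PySem.List.index?_eq_none_iff b "AC").mp h
      simp only [hb]
      refine Prod.ext ?_ ?_ <;> simp
    · have hb : "AC" ∈ b := by
        rcases (PySem.List.index?_eq_some_iff b "AC" k).mp h with ⟨pre, suf, rfl, _, _⟩
        simp
      simp only [hb]
      refine Prod.ext ?_ ?_ <;> simp <;> ring

-- build-loop preserves bucket-count
lemma lengthEB (p : List Int) (s : List String) (N : Nat) (l : List Int) :
    ∀ E : List (List String), E.length = N → (l.foldl (solveBodyB p s) E).length = N := by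
  induction l with
  | nil => intro E h; simpa using h
  | cons i l ih =>
    intro E h
    simp only [List.foldl_cons]
    exact ih _ (by simpa [solveBodyB, PySem.List.length_pySetD] using h)

-- the invariant: A's loop state is determined by B's partially built buckets
lemma invariant (p : List Int) (s : List String) (N : Nat) :
    ∀ (k : Nat), (k : Int) ≤ (p.length : Int) → (k : Int) ≤ (s.length : Int) →
    (∀ x ∈ p.take k, PySem.Raise.InRange N (x - 1)) →
    (PySem.List.pyRange 0 k 1).foldl (solveBodyA p s)
        (0, 0, List.replicate N (0 : Int), List.replicate N (0 : Int)) =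
      (((PySem.List.pyRange 0 k 1).foldl (solveBodyB p s) (List.replicate N ([] : List String))).map mAC |>.sum,
       ((PySem.List.pyRange 0 k 1).foldl (solveBodyB p s) (List.replicate N ([] : List String))).map fWA |>.sum,
       ((PySem.List.pyRange 0 k 1).foldl (solveBodyB p s) (List.replicate N ([] : List String))).map mAC,
       ((PySem.List.pyRange 0 k 1).foldl (solveBodyB p s) (List.replicate N ([] : List String))).map mWA) := by
  intro k
  induction k with
  | zero =>
    intro _ _ _
    simp [PySem.List.pyRange_one_eq_nil, mAC, mWA, fWA, PySem.List.index?, List.map_replicate]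
  | succ k ih =>
    intro hp hs htake
    have hkp : (k : Int) ≤ (p.length : Int) := by push_cast at hp ⊢; omega
    have hks : (k : Int) ≤ (s.length : Int) := by push_cast at hs ⊢; omega
    have htake' : ∀ x ∈ p.take k, PySem.Raise.InRange N (x - 1) := by
      intro x hx
      refine htake x ?_
      have hT : p.take k = (p.take (k + 1)).take k := by
        rw [List.take_take]; congr 1; omega
      exact List.take_subset _ _ (hT ▸ hx)
    have hcast : (((k + 1 : Nat)) : Int) = (k : Int) + 1 := by push_cast; ring
    have hrange : PySem.List.pyRange 0 ((k : Int) + 1) 1 =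
        PySem.List.pyRange 0 (k : Int) 1 ++ [(k : Int)] :=
      PySem.List.pyRange_one_succ_right (by positivity)
    rw [hcast, hrange, List.foldl_append, List.foldl_append, List.foldl_cons, List.foldl_nil,
      List.foldl_cons, List.foldl_nil, ih hkp hks htake']
    set E := (PySem.List.pyRange 0 (k : Int) 1).foldl (solveBodyB p s)
        (List.replicate N ([] : List String)) with hEdef
    have hE : E.length = N := lengthEB p s N _ _ (by simp)
    have hkplen : k < p.length := by push_cast at hp; omega
    have hpk : PySem.List.pyGetD p (k : Int) 0 = p[k] := by
      rw [PySem.List.pyGetD_natCast]; exact List.getD_eq_getElem p 0 hkplen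
    have hmem : p[k] ∈ p.take (k + 1) := by
      have hlt : k < (p.take (k + 1)).length := by simp; omega
      have : (p.take (k + 1))[k] = p[k] := List.getElem_take
      exact this ▸ List.getElem_mem hlt
    obtain ⟨jn, hj, hjN⟩ := pyIdx?_of_inRange (htake _ hmem)
    have hjE : jn < E.length := by omega
    set b := E[jn] with hbdef
    set e := PySem.List.pyGetD s (k : Int) "" with hedef
    have hgE : PySem.List.pyGetD E (p[k] - 1) [] = b := by
      rw [pyGetD_idx E _ _ jn (by rw [hE]; exact hj)]
      exact List.getD_eq_getElem E [] hjE
    have hgAC : PySem.List.pyGetD (E.map mAC) (p[k] - 1) 0 = mAC b := by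
      rw [pyGetD_idx _ _ _ jn (by simp [hE]; exact hj)]
      rw [List.getD_eq_getElem _ 0 (by simpa using hjE)]
      simp [hbdef]
    have hgWA : PySem.List.pyGetD (E.map mWA) (p[k] - 1) 0 = mWA b := by
      rw [pyGetD_idx _ _ _ jn (by simp [hE]; exact hj)]
      rw [List.getD_eq_getElem _ 0 (by simpa using hjE)]
      simp [hbdef]
    have hsE : ∀ v, PySem.List.pySetD E (p[k] - 1) v = E.set jn v := fun v =>
      pySetD_idx E _ v jn (by rw [hE]; exact hj)
    have hsAC : ∀ v, PySem.List.pySetD (E.map mAC) (p[k] - 1) v = (E.map mAC).set jn v := fun v =>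
      pySetD_idx _ _ v jn (by simp [hE]; exact hj)
    have hsWA : ∀ v, PySem.List.pySetD (E.map mWA) (p[k] - 1) v = (E.map mWA).set jn v := fun v =>
      pySetD_idx _ _ v jn (by simp [hE]; exact hj)
    simp only [solveBodyA, solveBodyB, hpk, ← hedef, hgE, hgAC, hgWA, hsE, hsAC, hsWA]
    by_cases hb : "AC" ∈ b
    · -- bucket already solved: A leaves the state; B's append changes nothing observable
      have hiAC : mAC b = 1 := by simp [mAC, hb]
      have hidx : PySem.List.index? (b ++ [e]) "AC" = PySem.List.index? b "AC" :=
        PySem.List.index?_append_of_mem [e] hb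
      have hmac : mAC (b ++ [e]) = mAC b := by simp [mAC, hb]
      have hmwa : mWA (b ++ [e]) = mWA b := by
        obtain ⟨kk, hkk⟩ : ∃ kk, PySem.List.index? b "AC" = some kk := by
          rcases hcase : PySem.List.index? b "AC" with _ | kk
          · exact absurd ((PySem.List.index?_eq_none_iff b "AC").mp hcase) (by simp [hb])
          · exact ⟨kk, rfl⟩
        unfold mWA; rw [hidx, hkk]
      have hfwa : fWA (b ++ [e]) = fWA b := by unfold fWA; rw [hidx]
      have hset : ∀ (f : List String → Int), f (b ++ [e]) = f b →
          (E.set jn (b ++ [e])).map f = E.map f := by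
        intro f hf
        rw [List.map_set, hf, hbdef, ← List.getElem_map (f := f) (h := by simpa using hjE)]
        exact List.set_getElem_self _
      rw [hiAC]
      simp only [hset mAC hmac, hset fWA hfwa, hset mWA hmwa]
      split_ifs <;> simp_all
    · -- bucket unsolved so far
      have hiAC : mAC b = 0 := by simp [mAC, hb]
      have hnone : PySem.List.index? b "AC" = none := (PySem.List.index?_eq_none_iff b "AC").mpr hb
      have hgetAC : (E.map mAC)[jn]'(by simpa using hjE) = mAC b := by
        rw [List.getElem_map]
      have hgetWA : (E.map mWA)[jn]'(by simpa using hjE) = mWA b := by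
        rw [List.getElem_map]
      have hgetFW : (E.map fWA)[jn]'(by simpa using hjE) = fWA b := by
        rw [List.getElem_map]
      rw [hiAC]
      by_cases he : e = "AC"
      · -- first AC of this bucket: ac += 1, wa += was[j] (= the bucket's length so far)
        have hidx : PySem.List.index? (b ++ [e]) "AC" = some b.length := by
          rw [he]; exact PySem.List.index?_append_singleton_self b "AC" hb
        have hmac : mAC (b ++ [e]) = 1 := by rw [he]; simp [mAC]
        have hmwa : mWA (b ++ [e]) = (b.length : Int) := by unfold mWA; rw [hidx]
        have hfwa : fWA (b ++ [e]) = (b.length : Int) := by unfold fWA; rw [hidx]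
        have hmwab : mWA b = (b.length : Int) := by unfold mWA; rw [hnone]
        have hfwab : fWA b = 0 := by unfold fWA; rw [hnone]
        have h1 : ((E.map mAC).set jn (1 : Int)).sum = (E.map mAC).sum + 1 := by
          rw [sum_set_int _ jn _ (by simpa using hjE), hgetAC, hiAC]; ring
        have h2 : ((E.map fWA).set jn ((b.length : Int))).sum = (E.map fWA).sum + (b.length : Int) := by
          rw [sum_set_int _ jn _ (by simpa using hjE), hgetFW, hfwab]; ring
        have h4 : (E.map mWA).set jn ((b.length : Int)) = E.map mWA := by
          rw [show ((b.length : Int)) = (E.map mWA)[jn]'(by simpa using hjE) by rw [hgetWA, hmwab]]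
          exact List.set_getElem_self _
        rw [if_pos he, if_pos (rfl : (0:Int) = 0)]
        simp only [List.map_set, hmac, hmwa, hfwa, h1, h2, h4]
        simp [hmwab]
      · -- another wrong attempt before the first AC: was[j] += 1
        have hnone' : PySem.List.index? (b ++ [e]) "AC" = none := by
          rw [PySem.List.index?_eq_none_iff]
          simp [hb, (Ne.symm he : ¬ "AC" = e)]
        have hmac : mAC (b ++ [e]) = 0 := by
          simp [mAC, hb, (Ne.symm he : ¬ "AC" = e)]
        have hmwa : mWA (b ++ [e]) = mWA b + 1 := by
          unfold mWA; rw [hnone, hnone']; simp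
        have hfwa : fWA (b ++ [e]) = 0 := by unfold fWA; rw [hnone']
        have hfwab : fWA b = 0 := by unfold fWA; rw [hnone]
        have h1 : (E.map mAC).set jn (0 : Int) = E.map mAC := by
          rw [show ((0 : Int)) = (E.map mAC)[jn]'(by simpa using hjE) by rw [hgetAC, hiAC]]
          exact List.set_getElem_self _
        have h2 : ((E.map fWA).set jn (0 : Int)).sum = (E.map fWA).sum := by
          rw [sum_set_int _ jn _ (by simpa using hjE), hgetFW, hfwab]; ring
        rw [if_neg he, if_pos (rfl : (0:Int) = 0)]
        simp only [List.map_set, hmac, hmwa, hfwa, h1, h2]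

-- ===== VERDICT (by name: the statement is the Claim_ definition above) =====
theorem solve_spec : Claim_equal_solve := by
  intro n m p s _ hpre
  obtain ⟨hp, hs, htake⟩ := hpre
  unfold Spec_solve solve solve_alt
  have hm : PySem.List.pyRange 0 m 1 = PySem.List.pyRange 0 ((m.toNat : Int)) 1 := by
    by_cases h : 0 ≤ m
    · rw [Int.toNat_of_nonneg h]
    · rw [PySem.List.pyRange_one_eq_nil (by omega), PySem.List.pyRange_one_eq_nil (by omega)]
  rw [hm, invariant p s n.toNat m.toNat (by omega) (by omega) htake, scan_eq]
  simp
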